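-- pv_equiv track=rewrite | github.com/dhaugee/Snake_Game | hw04.py | count_glorious
-- ===== SOURCE A (Python) =====
-- def glorious(val):
--     '''
--     Purpose: To identify numbers not divisible by any number from
--     10 to 50
--
--     Parameter: A number
--
--     Return value: Whether that number is 'glorious'
--     '''
--     glory = True
--     for i in range(10,50):
--         if val % i == 0:
--             glory = False
--     return glory
--
-- def count_glorious(low, high):
--     '''
--     Purpose: To identify the amount of glorious numbers in a
--     given range
--
--     Parameters: The starting and ending numbers of the range
--
--     Return value: The amount of glorious numbers in the range
--     '''
--     g = 0
--     if low > high: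
--         return 0
--     for j in range(low, high + 1):
--         glory = glorious(j)
--         if glory == True:
--             g += 1
--         else:
--             g += 0
--     return g
-- ===== SOURCE B (Python) =====
-- def count_glorious(low, high):
--     if low > high:
--         return 0
--     n = high - low + 1
--     is_glorious = [True] * n
--     for i in range(10, 50):
--         start = low + ((-low) % i)  # first multiple of i that is >= low (works for 0/negatives)
--         for m in range(start, high + 1, i):
--             is_glorious[m - low] = False
--     return sum(is_glorious)
-- ===== Notes on version B (the rewrite author's own statement) =====
-- stated objective: alternative
-- what changed: Replaces A's per-number test against all 40 divisors with a sieve: one boolean array over the range, each divisor i in 10..49 marks its multiples (first in-range multiple computed with Python %), then the unmarked entries are counted.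
import Mathlib
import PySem

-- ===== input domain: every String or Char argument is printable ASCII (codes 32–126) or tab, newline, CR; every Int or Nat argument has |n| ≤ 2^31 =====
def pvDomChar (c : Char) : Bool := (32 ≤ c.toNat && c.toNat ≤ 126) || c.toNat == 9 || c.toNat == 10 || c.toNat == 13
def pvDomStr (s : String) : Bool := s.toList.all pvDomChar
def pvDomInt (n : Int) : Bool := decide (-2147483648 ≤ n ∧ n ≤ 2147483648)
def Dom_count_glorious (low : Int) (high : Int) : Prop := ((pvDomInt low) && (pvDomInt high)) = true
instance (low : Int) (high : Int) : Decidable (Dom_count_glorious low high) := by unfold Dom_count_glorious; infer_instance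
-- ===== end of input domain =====

-- B is a sieve over the range (mark multiples of each divisor once) instead of A's
-- per-number scan of all 40 divisors: a different algorithm, same asymptotic cost.

-- ===== PORT A =====
def glorious (val : Int) : Bool :=
  (PySem.List.pyRange 10 50 1).foldl
    (fun glory i => if PySem.Int.mod val i = 0 then false else glory) true

def count_glorious (low : Int) (high : Int) : Int :=
  if low > high then 0
  else
    (PySem.List.pyRange low (high + 1) 1).foldl
      (fun g j => if glorious j = true then g + 1 else g + 0) 0

-- ===== PORT B =====
-- inner marking loop: 'for m in range(start, high+1, i): is_glorious[m-low] = False'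
-- (the write index m - low is nonnegative here, so '.set (m-low).toNat' is exact Python list assignment)
def markMult (low : Int) (high : Int) (l : List Bool) (i : Int) : List Bool :=
  (PySem.List.pyRange (low + PySem.Int.mod (-low) i) (high + 1) i).foldl
    (fun acc m => acc.set (m - low).toNat false) l

def count_glorious_alt (low : Int) (high : Int) : Int :=
  if low > high then 0
  else
    let n := (high - low + 1).toNat
    let marked := (PySem.List.pyRange 10 50 1).foldl (markMult low high) (List.replicate n true)
    marked.foldl (fun s b => s + (if b then 1 else 0)) 0

-- ===== PRECONDITION & SPEC =====
def Spec_count_glorious (low : Int) (high : Int) (out : Int) : Prop := out = count_glorious_alt low high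
instance (low : Int) (high : Int) (out : Int) : Decidable (Spec_count_glorious low high out) := by unfold Spec_count_glorious; infer_instance

-- ===== CLAIM (what is proved, stated in full; the proofs are below) =====
def Claim_equal_count_glorious : Prop := ∀ (low : Int) (high : Int), Dom_count_glorious low high → Spec_count_glorious low high (count_glorious low high)

-- ===== LEMMAS AND PROOFS =====

-- A's flag loop over a divisor list is an 'all' test
theorem glorious_foldl (j : Int) (ds : List Int) (b : Bool) :
    ds.foldl (fun glory i => if PySem.Int.mod j i = 0 then false else glory) b
      = (b && ds.all (fun i => !(decide (PySem.Int.mod j i = 0)))) := by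
  induction ds generalizing b with
  | nil => simp
  | cons d tl ih =>
    simp only [List.foldl_cons, List.all_cons, ih]
    by_cases h : PySem.Int.mod j d = 0 <;> simp [h]

-- a fold of list writes, pointwise
theorem foldl_set_getElem? (low : Int) (ms : List Int) (l : List Bool) (k : Nat)
    (h : ∀ m ∈ ms, low ≤ m) :
    (ms.foldl (fun acc m => acc.set (m - low).toNat false) l)[k]?
      = if (low + (k : Int)) ∈ ms ∧ k < l.length then some false else l[k]? := by
  induction ms generalizing l with
  | nil => simp
  | cons m tl ih =>
    have hm : low ≤ m := h m (by simp)
    simp only [List.foldl_cons]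
    rw [ih (l.set (m - low).toNat false) (fun x hx => h x (by simp [hx]))]
    rw [List.getElem?_set, List.length_set]
    by_cases hmem : (low + (k : Int)) ∈ tl
    · by_cases hkl : k < l.length <;> simp [hmem, hkl] <;> omega
    · have hiff : (m - low).toNat = k ↔ low + (k : Int) = m := by omega
      by_cases heq : (m - low).toNat = k
      · have : low + (k : Int) = m := hiff.mp heq
        by_cases hkl : k < l.length <;> simp_all
      · have : ¬ low + (k : Int) = m := fun hc => heq (hiff.mpr hc)
        simp_all

theorem markMult_length (low high : Int) (l : List Bool) (i : Int) :
    (markMult low high l i).length = l.length := by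
  unfold markMult
  generalize PySem.List.pyRange (low + PySem.Int.mod (-low) i) (high + 1) i = ms
  induction ms generalizing l with
  | nil => rfl
  | cons m tl ih => simpa using ih (l.set (m - low).toNat false)

-- membership in the multiples range is divisibility
theorem mem_multiples (low high i : Int) (k : Nat) (hi : 0 < i)
    (hk : (low : Int) + k ≤ high) :
    ((low + (k : Int)) ∈ PySem.List.pyRange (low + PySem.Int.mod (-low) i) (high + 1) i)
      ↔ i ∣ (low + (k : Int)) := by
  have hr0 : 0 ≤ PySem.Int.mod (-low) i := PySem.Int.mod_nonneg _ hi
  have hr1 : PySem.Int.mod (-low) i < i := PySem.Int.mod_lt _ hi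
  have heq := PySem.Int.floordiv_mul_add_mod (-low) i
  have hdvd : i ∣ (low + PySem.Int.mod (-low) i) :=
    ⟨-(PySem.Int.floordiv (-low) i), by linear_combination heq⟩
  rw [PySem.List.mem_pyRange_iff_of_pos hi]
  constructor
  · rintro ⟨h1, h2, h3⟩
    have h4 := dvd_add h3 hdvd
    rwa [sub_add_cancel] at h4
  · intro h
    have hd : i ∣ (low + (k : Int) - (low + PySem.Int.mod (-low) i)) := dvd_sub h hdvd
    refine ⟨?_, by omega, hd⟩
    obtain ⟨c, hc⟩ := hd
    rcases lt_or_ge c 0 with hc0 | hc0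
    · nlinarith [Int.natCast_nonneg k]
    · nlinarith [Int.natCast_nonneg k]

theorem markMult_getElem? (low high i : Int) (l : List Bool) (k : Nat) (hi : 0 < i)
    (hk : (low : Int) + k ≤ high) :
    (markMult low high l i)[k]?
      = if i ∣ (low + (k : Int)) ∧ k < l.length then some false else l[k]? := by
  unfold markMult
  rw [foldl_set_getElem? low _ l k (fun m hm => by
    have := (PySem.List.mem_pyRange_iff_of_pos hi m).mp hm
    have hr0 : 0 ≤ PySem.Int.mod (-low) i := PySem.Int.mod_nonneg _ hi
    omega)]
  simp only [mem_multiples low high i k hi hk]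

theorem foldl_markMult_getElem? (low high : Int) (ds : List Int) (l : List Bool) (k : Nat)
    (hpos : ∀ i ∈ ds, 0 < i) (hk : (low : Int) + k ≤ high) :
    (ds.foldl (markMult low high) l)[k]?
      = if (∃ i ∈ ds, i ∣ (low + (k : Int))) ∧ k < l.length then some false else l[k]? := by
  induction ds generalizing l with
  | nil => simp
  | cons d tl ih =>
    have hd : 0 < d := hpos d (by simp)
    simp only [List.foldl_cons]
    rw [ih (markMult low high l d) (fun x hx => hpos x (by simp [hx]))]
    rw [markMult_getElem? low high d l k hd hk, markMult_length]
    by_cases h1 : ∃ i ∈ tl, i ∣ (low + (k : Int))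
    · by_cases hkl : k < l.length <;> simp [h1, hkl]
    · by_cases h2 : d ∣ (low + (k : Int)) <;> by_cases hkl : k < l.length <;> simp_all

theorem foldl_markMult_len (low high : Int) (ds : List Int) (l : List Bool) :
    (ds.foldl (markMult low high) l).length = l.length := by
  induction ds generalizing l with
  | nil => rfl
  | cons d tl ih => simp only [List.foldl_cons, ih, markMult_length]

theorem count_if_fun_eq :
    (fun (s : Int) (b : Bool) => s + (if b then 1 else 0))
      = (fun s b => if (id b) = true then s + 1 else s) := by
  funext s b
  cases b <;> simp

theorem glorious_eq (x : Int) :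
    glorious x = true ↔ ∀ i ∈ PySem.List.pyRange 10 50 1, ¬ i ∣ x := by
  rw [glorious, glorious_foldl]
  simp [List.all_eq_true, PySem.Int.mod_eq_zero_iff_dvd]

theorem marked_eq_map (low high : Int) (hlh : ¬ low > high) :
    (PySem.List.pyRange 10 50 1).foldl (markMult low high)
        (List.replicate (high - low + 1).toNat true)
      = (List.range (high - low + 1).toNat).map (fun k : Nat => glorious (low + (k : Int))) := by
  have hpos : ∀ i ∈ PySem.List.pyRange 10 50 1, (0:Int) < i := by
    intro i hi
    have := PySem.List.mem_pyRange_one.mp hi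
    omega
  apply List.ext_getElem?
  intro k
  by_cases hk : k < (high - low + 1).toNat
  · have hkh : low + (k : Int) ≤ high := by omega
    rw [foldl_markMult_getElem? low high _ _ k hpos hkh]
    rw [List.length_replicate, List.getElem?_replicate, List.getElem?_map,
        List.getElem?_range hk]
    by_cases h : ∃ i ∈ PySem.List.pyRange 10 50 1, i ∣ (low + (k : Int))
    · have hg : glorious (low + (k : Int)) = false := by
        obtain ⟨i, hi, hd⟩ := h
        rcases Bool.eq_false_or_eq_true (glorious (low + (k : Int))) with hg | hg
        · exact absurd hd ((glorious_eq _).mp hg i hi)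
        · exact hg
      rw [if_pos ⟨h, hk⟩]
      simp [hg]
    · have hg : glorious (low + (k : Int)) = true :=
        (glorious_eq _).mpr (fun i hi hd => h ⟨i, hi, hd⟩)
      rw [if_neg (fun hc => h hc.1), if_pos hk]
      simp [hg]
  · rw [List.getElem?_eq_none, List.getElem?_eq_none]
    · simpa using hk
    · rw [foldl_markMult_len, List.length_replicate]; omega

-- ===== VERDICT (by name: the statement is the Claim_ definition above) =====
theorem count_glorious_spec : Claim_equal_count_glorious := by
  intro low high _
  unfold Spec_count_glorious count_glorious count_glorious_alt
  by_cases h : low > high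
  · simp [h]
  · simp only [if_neg h]
    rw [marked_eq_map low high h, count_if_fun_eq, PySem.List.foldl_count_if,
        List.countP_map]
    have hfun : (fun (g : Int) (j : Int) => if glorious j = true then g + 1 else g + 0)
        = (fun g j => if glorious j = true then g + 1 else g) := by
      funext g j; simp
    rw [hfun, PySem.List.foldl_count_if, PySem.List.pyRange_one, List.countP_map]
    have hn : (high + 1 - low).toNat = (high - low + 1).toNat := by omega
    rw [hn]
    rfl
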